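-- pv_equiv track=rewrite | github.com/heejin1998/Algorithm | Greedy/part3_Q06.py | solution
-- ===== SOURCE A (Python) =====
-- def solution(food_times, k):
--     food_len = len(food_times)
--     if sum(food_times) <= k: # 더 섭취해야 할 음식이 없다면
--         return -1
--
--     i = 0 # 음식 번호 인덱스 초기화
--
--     while k:
--         if food_times[i] == 0: # 음식을 다 먹었을 경우
--             i += 1 # 다음 음식으로 이동
--         else: # 음식을 먹어야 할 경우
--             food_times[i] -= 1 # 음식 시간 감소
--             k -= 1
--             i += 1 # 다음 음식으로 이동
--         if i == food_len:
--             i = 0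
--     return i+1
-- ===== SOURCE B (Python) =====
-- def solution(food_times, k):
--     # Batch whole round-robin passes at once (jump to the next minimum positive
--     # time) instead of simulating unit by unit; does not mutate food_times.
--     if sum(food_times) <= k:
--         return -1
--     n = len(food_times)
--     ft = list(food_times)
--     while True:
--         nz = sum(1 for x in ft if x != 0)
--         if k > nz:
--             m = min(x for x in ft if x > 0)
--             p = min(m, (k - 1) // nz)
--             ft = [x - p if x != 0 else x for x in ft]
--             k -= p * nz
--         else:
--             for j, x in enumerate(ft):
--                 if x != 0:
--                     if k == 1:
--                         return (j + 1) % n + 1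
--                     k -= 1
--             return 1
-- ===== Notes on version B (the rewrite author's own statement) =====
-- stated objective: alternative
-- what changed: B replaces A's one-unit-at-a-time round-robin simulation (index walking with wraparound over a mutated list) with batch processing: it jumps whole passes at once up to the next minimum positive food time, then locates the k-th remaining food with a single scan.
import Mathlib
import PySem

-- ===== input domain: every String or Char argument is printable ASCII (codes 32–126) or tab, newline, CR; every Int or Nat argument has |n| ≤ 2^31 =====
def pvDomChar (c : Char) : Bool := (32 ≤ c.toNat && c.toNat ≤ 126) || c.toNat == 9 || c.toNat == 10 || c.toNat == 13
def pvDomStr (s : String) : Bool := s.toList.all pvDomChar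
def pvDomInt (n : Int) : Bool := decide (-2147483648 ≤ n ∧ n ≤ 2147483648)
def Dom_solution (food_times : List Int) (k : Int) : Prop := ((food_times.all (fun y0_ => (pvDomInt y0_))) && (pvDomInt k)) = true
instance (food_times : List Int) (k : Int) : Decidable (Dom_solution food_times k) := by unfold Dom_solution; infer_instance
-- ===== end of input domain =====

-- B batches whole round-robin passes at once (jumping to the next minimum positive
-- time) instead of simulating unit by unit. A mutates food_times in place while B
-- does not: the equivalence proved here is about the RETURN value only.

-- ===== PORT A =====
-- "if i == food_len: i = 0"
def wrapIdx (n i : Nat) : Nat := if i = n then 0 else i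

-- the "while k:" loop of A; returns the final i (none = fuel exhausted or IndexError)
def aLoop : List Int → Int → Nat → Nat → Nat → Option Nat
  | _, _, _, _, 0 => none
  | ft, k, i, n, fuel+1 =>
    if k = 0 then some i
    else
      match PySem.List.pyGet? ft (i : Int) with
      | none => none   -- IndexError (excluded by Pre_)
      | some v =>
        if v = 0 then aLoop ft k (wrapIdx n (i+1)) n fuel
        else aLoop (ft.set i (v - 1)) (k - 1) (wrapIdx n (i+1)) n fuel

def solution (food_times : List Int) (k : Int) : Int :=
  let food_len := food_times.length
  if food_times.sum ≤ k then -1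
  else
    -- fuel guard only: within Pre_ the fuel is proved sufficient
    match aLoop food_times k 0 food_len ((k.toNat + 1) * (food_len + 1) + food_len + 1) with
    | some i => (i : Int) + 1
    | none => 0

-- ===== PORT B =====
-- the final partial pass of Source B: scan for the k-th not-yet-finished food
def bFind : List Int → Int → Nat → Nat → Int
  | [], _, _, _ => 1
  | x :: xs, k, j, n =>
    if x ≠ 0 then
      (if k = 1 then PySem.Int.mod ((j : Int) + 1) (n : Int) + 1
       else bFind xs (k - 1) (j + 1) n)
    else bFind xs k (j + 1) n

-- "[x - p if x != 0 else x for x in ft]"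
def subNZ (p : Int) (ft : List Int) : List Int := ft.map (fun x => if x ≠ 0 then x - p else x)

-- "sum(1 for x in ft if x != 0)"
def countNZ (ft : List Int) : Nat := ft.countP (fun x => decide (x ≠ 0))

def bLoop : List Int → Int → Nat → Nat → Int
  | _, _, _, 0 => 0   -- fuel guard only: fuel is proved sufficient
  | ft, k, n, fuel+1 =>
    let nz : Int := (countNZ ft : Nat)
    if nz < k then
      match (ft.filter (fun x => decide (0 < x))).min? with
      | none => 0      -- Python's min() on empty: unreachable (sum > k invariant)
      | some m =>
        let p := min m (PySem.Int.floordiv (k - 1) nz)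
        bLoop (subNZ p ft) (k - p * nz) n fuel
    else bFind ft k 0 n

def solution_alt (food_times : List Int) (k : Int) : Int :=
  if food_times.sum ≤ k then -1
  else bLoop food_times k food_times.length (k.toNat + 2)

-- ===== PRECONDITION & SPEC =====
-- Pre_ excludes only inputs where A never returns: with k < 0 and sum(food_times) > k
-- the "while k" loop never sees k == 0, so A raises IndexError ([]) or loops forever.
def Pre_solution (food_times : List Int) (k : Int) : Prop :=
  food_times.sum ≤ k ∨ 0 ≤ k
instance (food_times : List Int) (k : Int) : Decidable (Pre_solution food_times k) := by
  unfold Pre_solution; infer_instance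

def pvWitness_solution : List Int × Int := ([3, 1, 2], 5)

def Spec_solution (food_times : List Int) (k : Int) (out : Int) : Prop := out = solution_alt food_times k
instance (food_times : List Int) (k : Int) (out : Int) : Decidable (Spec_solution food_times k out) := by unfold Spec_solution; infer_instance

-- ===== CLAIM (what is proved, stated in full; the proofs are below) =====
def Claim_equal_solution : Prop := ∀ (food_times : List Int) (k : Int), Dom_solution food_times k → Pre_solution food_times k → Spec_solution food_times k (solution food_times k)

-- ===== LEMMAS AND PROOFS =====

-- the list after A finishes a pass over positions ≥ i (positions < i untouched)
def decFrom (ft : List Int) (i : Nat) : List Int :=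
  ft.take i ++ (ft.drop i).map (fun x => if x ≠ 0 then x - 1 else x)

def nzFrom (ft : List Int) (i : Nat) : Nat := countNZ (ft.drop i)

theorem take_append_cons_of_len {α : Type} (L : List α) (x : α) (R : List α) (n : Nat)
    (h : L.length = n) : (L ++ x :: R).take (n + 1) = L ++ [x] := by
  subst h
  induction L with
  | nil => simp
  | cons a L ih => simpa using ih

theorem foldl_min_le (l : List Int) : ∀ a : Int, l.foldl min a ≤ a ∧ ∀ x ∈ l, l.foldl min a ≤ x := by
  induction l with
  | nil => intro a; exact ⟨le_rfl, by simp⟩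
  | cons y ys ih =>
    intro a
    refine ⟨le_trans (ih (min a y)).1 (min_le_left a y), ?_⟩
    intro x hx
    rcases List.mem_cons.mp hx with rfl | hx'
    · exact le_trans (ih (min a x)).1 (min_le_right a x)
    · exact (ih (min a y)).2 x hx'

theorem int_min?_le (l : List Int) (m x : Int) (hm : l.min? = some m) (hx : x ∈ l) : m ≤ x := by
  cases l with
  | nil => simp [List.min?] at hm
  | cons y ys =>
    simp [List.min?] at hm
    subst hm
    rcases List.mem_cons.mp hx with rfl | hx'
    · exact (foldl_min_le ys x).1
    · exact (foldl_min_le ys y).2 x hx'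

theorem sum_subNZ (p : Int) (ft : List Int) :
    (subNZ p ft).sum = ft.sum - p * (countNZ ft : Int) := by
  induction ft with
  | nil => simp [subNZ, countNZ]
  | cons x xs ih =>
    by_cases hx : x = 0 <;>
      simp [subNZ, countNZ, hx, List.countP_cons] at ih ⊢ <;> push_cast <;> linarith

theorem nz_pos_of_sum_pos (ft : List Int) (h : 0 < ft.sum) : 1 ≤ countNZ ft := by
  by_contra hc
  have h0 : countNZ ft = 0 := by omega
  have hall : ∀ x ∈ ft, x = 0 := by
    intro x hx
    have := List.countP_eq_zero.mp h0 x hx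
    simpa using this
  have : ft.sum = 0 := List.sum_eq_zero hall
  omega

theorem exists_pos_of_sum_pos : ∀ ft : List Int, 0 < ft.sum → ∃ x ∈ ft, 0 < x := by
  intro ft
  induction ft with
  | nil => intro h; simp at h
  | cons x xs ih =>
    intro h
    rw [List.sum_cons] at h
    by_cases hx : 0 < x
    · exact ⟨x, by simp, hx⟩
    · obtain ⟨y, hy, hp⟩ := ih (by omega)
      exact ⟨y, by simp [hy], hp⟩

theorem subNZ_zero (ft : List Int) : subNZ 0 ft = ft := by
  rw [subNZ]
  have h : ∀ x ∈ ft, (if x ≠ 0 then x - 0 else x) = x := by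
    intro x _; split <;> simp
  rw [List.map_congr_left h]
  simp

-- ONE full pass of A's unit loop from position i equals decrementing the suffix
theorem pass_lemma : ∀ m : Nat, ∀ ft : List Int, ∀ k : Int, ∀ i fuel : Nat,
    i < ft.length → ft.length - i = m →
    (nzFrom ft i : Int) < k →
    aLoop ft k i ft.length (fuel + m) =
      aLoop (decFrom ft i) (k - (nzFrom ft i : Int)) 0 ft.length fuel := by
  intro m
  induction m with
  | zero => intro ft k i fuel hi hm hk; exact absurd hm (by omega)
  | succ m ih =>
    intro ft k i fuel hi hm hk
    have hk0 : k ≠ 0 := by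
      have := Int.natCast_nonneg (nzFrom ft i); omega
    have hdrop : ft.drop i = ft[i] :: ft.drop (i+1) := List.drop_eq_getElem_cons hi
    have hpg : PySem.List.pyGet? ft (i : Int) = some ft[i] := by
      simp [List.getElem?_eq_getElem hi]
    have harr : fuel + (m+1) = (fuel + m) + 1 := by omega
    rw [harr]
    simp only [aLoop, if_neg hk0, hpg]
    by_cases hv : ft[i] = 0
    · rw [if_pos hv]
      by_cases hend : i + 1 = ft.length
      · have hm0 : m = 0 := by omega
        subst hm0
        have h1 : ft.drop (i+1) = [] := List.drop_eq_nil_of_le (by omega)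
        have hnz : nzFrom ft i = 0 := by
          simp [nzFrom, countNZ, hdrop, h1, hv]
        have hdec : decFrom ft i = ft := by
          conv_rhs => rw [← List.take_append_drop i ft]
          rw [decFrom, hdrop, h1, hv]
          simp
        rw [wrapIdx, if_pos hend, hnz, hdec]
        norm_num
      · have hw : wrapIdx ft.length (i+1) = i+1 := by rw [wrapIdx, if_neg hend]
        rw [hw]
        have hnz' : nzFrom ft (i+1) = nzFrom ft i := by
          rw [nzFrom, nzFrom, countNZ, countNZ, hdrop, List.countP_cons]
          simp [hv]
        have hdec' : decFrom ft (i+1) = decFrom ft i := by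
          rw [decFrom, decFrom, hdrop, List.take_succ, List.getElem?_eq_getElem hi, hv]
          simp
        rw [← hnz', ← hdec']
        exact ih ft k (i+1) fuel (by omega) (by omega) (by rw [hnz']; exact hk)
    · rw [if_neg hv]
      have hset : ft.set i (ft[i] - 1) = ft.take i ++ (ft[i] - 1) :: ft.drop (i+1) := by
        rw [List.set_eq_take_append_cons_drop, if_pos hi]
      have hlen' : (ft.set i (ft[i] - 1)).length = ft.length := List.length_set
      have hLlen : (ft.take i).length = i := by
        rw [List.length_take]; omega
      by_cases hend : i + 1 = ft.length
      · have hm0 : m = 0 := by omega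
        subst hm0
        have h1 : ft.drop (i+1) = [] := List.drop_eq_nil_of_le (by omega)
        have hnz : nzFrom ft i = 1 := by
          simp [nzFrom, countNZ, hdrop, h1, hv]
        have hdec : decFrom ft i = ft.set i (ft[i] - 1) := by
          rw [decFrom, hdrop, h1, hset, h1]
          simp [hv]
        rw [wrapIdx, if_pos hend, hnz, hdec]
        norm_num
      · have hw : wrapIdx ft.length (i+1) = i+1 := by rw [wrapIdx, if_neg hend]
        rw [hw]
        have hdropset : (ft.set i (ft[i] - 1)).drop (i+1) = ft.drop (i+1) := by
          rw [List.drop_set, if_pos (by omega)]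
        have hnzrel : nzFrom ft i = nzFrom ft (i+1) + 1 := by
          rw [nzFrom, nzFrom, countNZ, countNZ, hdrop, List.countP_cons]
          simp [hv]
        have hnzset : nzFrom (ft.set i (ft[i] - 1)) (i+1) = nzFrom ft (i+1) := by
          rw [nzFrom, hdropset, nzFrom]
        have IH := ih (ft.set i (ft[i] - 1)) (k - 1) (i+1) fuel
          (by rw [hlen']; omega) (by rw [hlen']; omega)
          (by rw [hnzset]; omega)
        rw [hlen'] at IH
        rw [IH]
        have htake : (ft.set i (ft[i] - 1)).take (i+1) = ft.take i ++ [ft[i] - 1] := by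
          rw [hset]
          exact take_append_cons_of_len _ _ _ i hLlen
        have hdeceq : decFrom (ft.set i (ft[i] - 1)) (i+1) = decFrom ft i := by
          rw [decFrom, decFrom, hdropset, hdrop, htake, List.map_cons, if_pos hv,
            List.append_assoc, List.singleton_append]
        rw [hdeceq]
        have harith : k - 1 - ((nzFrom (ft.set i (ft[i] - 1)) (i+1) : Nat) : Int)
            = k - ((nzFrom ft i : Nat) : Int) := by
          rw [hnzset, hnzrel]
          push_cast
          ring
        rw [harith]

-- p full passes of A's unit loop
theorem passes_lemma : ∀ p : Nat, ∀ ft : List Int, ∀ k : Int, ∀ fuel : Nat,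
    0 < ft.length →
    (∀ x ∈ ft, 0 < x → (p : Int) ≤ x) →
    ((p : Int) * (countNZ ft : Int)) < k →
    aLoop ft k 0 ft.length (fuel + p * ft.length) =
      aLoop (subNZ (p : Int) ft) (k - (p : Int) * (countNZ ft : Int)) 0 ft.length fuel := by
  intro p
  induction p with
  | zero =>
    intro ft k fuel _ _ _
    simp [subNZ_zero]
  | succ p ih =>
    intro ft k fuel hn hb hk
    have hnz0 : nzFrom ft 0 = countNZ ft := by simp [nzFrom]
    have hcnt0 : (0:Int) ≤ (countNZ ft : Int) := Int.natCast_nonneg _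
    have hpnn : (0:Int) ≤ (p:Int) := Int.natCast_nonneg _
    have hk1 : (countNZ ft : Int) < k := by
      push_cast at hk
      nlinarith
    have hdec0 : decFrom ft 0 = subNZ 1 ft := by simp [decFrom, subNZ]
    have hf : fuel + (p+1) * ft.length = (fuel + p * ft.length) + ft.length := by ring
    rw [hf]
    have hpass := pass_lemma ft.length ft k 0 (fuel + p * ft.length) (by omega) (by omega)
      (by rw [hnz0]; exact hk1)
    rw [hpass, hnz0, hdec0]
    rcases Nat.eq_zero_or_pos p with hp0 | hppos
    · subst hp0
      norm_num
    · have hlen1 : (subNZ 1 ft).length = ft.length := by simp [subNZ]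
      have hb1 : ∀ x ∈ subNZ 1 ft, 0 < x → (p:Int) ≤ x := by
        intro x hx hxp
        rw [subNZ] at hx
        obtain ⟨y, hy, rfl⟩ := List.mem_map.mp hx
        by_cases hy0 : y = 0
        · simp [hy0] at hxp
        · simp only [if_pos hy0] at hxp ⊢
          have h2 : 0 < y := by omega
          have := hb y hy h2
          push_cast at this
          omega
      have hcnteq : countNZ (subNZ 1 ft) = countNZ ft := by
        rw [countNZ, subNZ, List.countP_map, countNZ]
        apply List.countP_congr
        intro x hx
        simp only [Function.comp_apply]
        by_cases hx0 : x = 0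
        · simp [hx0]
        · have hx1 : x ≠ 1 := by
            intro h1
            have := hb x hx (by omega)
            push_cast at this
            omega
          simp only [if_pos hx0]
          constructor <;> intro _ <;> simp_all <;> omega
      have hsub : subNZ (p:Int) (subNZ 1 ft) = subNZ ((p:Int)+1) ft := by
        rw [subNZ, subNZ, subNZ, List.map_map]
        apply List.map_congr_left
        intro x hx
        simp only [Function.comp_apply]
        by_cases hx0 : x = 0
        · simp [hx0]
        · have hx1 : x ≠ 1 := by
            intro h1
            have := hb x hx (by omega)
            push_cast at this
            omega
          rw [if_pos hx0, if_pos (by omega : x - 1 ≠ 0), if_pos hx0]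
          ring
      have hkIH : (p:Int) * (countNZ (subNZ 1 ft) : Int) < k - (countNZ ft : Int) := by
        rw [hcnteq]
        push_cast at hk
        nlinarith
      have IH := ih (subNZ 1 ft) (k - (countNZ ft : Int)) fuel (by rw [hlen1]; omega) hb1 hkIH
      rw [hlen1, hcnteq] at IH
      rw [IH, hsub]
      congr 1
      push_cast
      ring

theorem bFind_nonpos : ∀ l : List Int, ∀ k : Int, ∀ j n : Nat, k ≤ 0 → bFind l k j n = 1 := by
  intro l
  induction l with
  | nil => intro k j n _; simp [bFind]
  | cons x xs ih =>
    intro k j n hk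
    by_cases hx : x = 0
    · simp only [bFind, hx, if_neg (by simp : ¬ ((0:Int) ≠ 0))]
      exact ih _ _ _ hk
    · simp only [bFind, if_pos hx, if_neg (by omega : ¬ (k = 1))]
      exact ih _ _ _ (by omega)

-- the final partial pass: A's unit loop vs Source B's scan for the k-th nonzero
theorem find_lemma : ∀ fuel : Nat, ∀ ft : List Int, ∀ k : Int, ∀ i : Nat,
    i ≤ ft.length → 1 ≤ k → k ≤ (nzFrom ft i : Int) → ft.length - i + 1 ≤ fuel →
    ∃ r : Nat, aLoop ft k i ft.length fuel = some r ∧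
      bFind (ft.drop i) k i ft.length = (r : Int) + 1 := by
  intro fuel
  induction fuel with
  | zero => intro ft k i _ _ _ hf; exact absurd hf (by omega)
  | succ fuel ih =>
    intro ft k i hi hk1 hk2 hf
    have hilt : i < ft.length := by
      by_contra hc
      have hd : ft.drop i = [] := List.drop_eq_nil_of_le (by omega)
      rw [nzFrom, hd] at hk2
      simp [countNZ] at hk2
      omega
    have hdrop : ft.drop i = ft[i] :: ft.drop (i+1) := List.drop_eq_getElem_cons hilt
    have hpg : PySem.List.pyGet? ft (i : Int) = some ft[i] := by
      simp [List.getElem?_eq_getElem hilt]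
    simp only [aLoop, if_neg (by omega : ¬ (k = 0)), hpg, hdrop, bFind]
    by_cases hv : ft[i] = 0
    · rw [if_pos hv, if_neg (by simp [hv] : ¬ (ft[i] ≠ 0))]
      have hend : i + 1 ≠ ft.length := by
        intro h
        have h1 : ft.drop (i+1) = [] := List.drop_eq_nil_of_le (by omega)
        rw [nzFrom, hdrop, h1] at hk2
        simp [countNZ, hv] at hk2
        omega
      have hw : wrapIdx ft.length (i+1) = i+1 := by rw [wrapIdx, if_neg hend]
      rw [hw]
      have hnz : nzFrom ft (i+1) = nzFrom ft i := by
        simp [nzFrom, countNZ, hdrop, hv]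
      exact ih ft k (i+1) (by omega) hk1 (by rw [hnz]; exact hk2) (by omega)
    · rw [if_neg hv, if_pos hv]
      by_cases hk' : k = 1
      · subst hk'
        refine ⟨wrapIdx ft.length (i+1), ?_, ?_⟩
        · obtain ⟨f, rfl⟩ : ∃ f, fuel = f + 1 := ⟨fuel - 1, by omega⟩
          simp [aLoop]
        · rw [if_pos rfl]
          have hn0 : (0:Int) < (ft.length : Int) := by exact_mod_cast (show 0 < ft.length by omega)
          rw [PySem.Int.mod_eq_emod_of_pos hn0]
          by_cases hend : i + 1 = ft.length
          · rw [wrapIdx, if_pos hend]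
            have he : ((i:Int) + 1) = (ft.length : Int) := by omega
            rw [he, Int.emod_self]
            norm_num
          · rw [wrapIdx, if_neg hend]
            rw [Int.emod_eq_of_lt (by omega) (by omega : (i:Int) + 1 < (ft.length : Int))]
            push_cast
            ring
      · rw [if_neg hk']
        have hend : i + 1 ≠ ft.length := by
          intro h
          have h1 : ft.drop (i+1) = [] := List.drop_eq_nil_of_le (by omega)
          rw [nzFrom, hdrop, h1] at hk2
          simp [countNZ, hv] at hk2
          omega
        have hw : wrapIdx ft.length (i+1) = i+1 := by rw [wrapIdx, if_neg hend]
        rw [hw]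
        have hlen' : (ft.set i (ft[i] - 1)).length = ft.length := List.length_set
        have hdropset : (ft.set i (ft[i] - 1)).drop (i+1) = ft.drop (i+1) := by
          rw [List.drop_set, if_pos (by omega)]
        have hnzset : nzFrom (ft.set i (ft[i] - 1)) (i+1) = nzFrom ft (i+1) := by
          rw [nzFrom, hdropset, nzFrom]
        have hrel : nzFrom ft i = nzFrom ft (i+1) + 1 := by
          rw [nzFrom, nzFrom, countNZ, countNZ, hdrop, List.countP_cons]
          simp [hv]
        obtain ⟨r, h1, h2⟩ := ih (ft.set i (ft[i] - 1)) (k-1) (i+1)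
          (by rw [hlen']; omega) (by omega)
          (by rw [hnzset]; omega) (by rw [hlen']; omega)
        rw [hlen'] at h1
        rw [hdropset, hlen'] at h2
        exact ⟨r, h1, h2⟩

theorem main_lemma : ∀ K : Nat, ∀ ft : List Int, ∀ k : Int, ∀ fA fB : Nat,
    0 ≤ k → k < ft.sum → k.toNat ≤ K →
    (K + 1) * (ft.length + 1) + 1 ≤ fA → K + 1 ≤ fB →
    ∃ r : Nat, aLoop ft k 0 ft.length fA = some r ∧
      bLoop ft k ft.length fB = (r : Int) + 1 := by
  intro K
  induction K using Nat.strong_induction_on with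
  | _ K ih =>
    intro ft k fA fB hk0 hks hkK hfA hfB
    obtain ⟨fb, rfl⟩ : ∃ fb, fB = fb + 1 := ⟨fB - 1, by omega⟩
    by_cases hkz : k = 0
    · subst hkz
      obtain ⟨fa, rfl⟩ : ∃ fa, fA = fa + 1 := ⟨fA - 1, by omega⟩
      refine ⟨0, by simp [aLoop], ?_⟩
      have hno : ¬ (((countNZ ft : Nat) : Int) < 0) := not_lt.mpr (Int.natCast_nonneg _)
      simp only [bLoop]
      rw [if_neg hno, bFind_nonpos ft 0 0 ft.length le_rfl]
      norm_num
    · have hk1 : 1 ≤ k := by omega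
      have hsum : 0 < ft.sum := by omega
      have hnpos : 0 < ft.length := by
        rcases ft with _ | ⟨x, xs⟩
        · simp at hsum
        · simp
      have hcnt1 : 1 ≤ countNZ ft := nz_pos_of_sum_pos ft hsum
      have hcpos : (0:Int) < (countNZ ft : Int) := by exact_mod_cast hcnt1
      by_cases hbr : ((countNZ ft : Nat) : Int) < k
      · -- batching branch
        obtain ⟨x0, hx0m, hx0p⟩ := exists_pos_of_sum_pos ft hsum
        have hfne : ft.filter (fun x => decide (0 < x)) ≠ [] :=
          List.ne_nil_of_mem (List.mem_filter.mpr ⟨hx0m, by simpa using hx0p⟩)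
        rcases hmin : (ft.filter (fun x => decide (0 < x))).min? with _ | m
        · exact absurd (List.min?_eq_none_iff.mp hmin) hfne
        have hmmem : m ∈ ft.filter (fun x => decide (0 < x)) := List.min?_mem hmin
        have hmpos : (0:Int) < m := by simpa using (List.mem_filter.mp hmmem).2
        have hmle : ∀ x ∈ ft, 0 < x → m ≤ x := by
          intro x hx hxp
          exact int_min?_le _ _ _ hmin (List.mem_filter.mpr ⟨hx, by simpa using hxp⟩)
        have hq : (PySem.Int.floordiv (k-1) ((countNZ ft : Nat) : Int)) * ((countNZ ft : Nat) : Int) ≤ k - 1 :=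
          (PySem.Int.le_floordiv_iff_mul_le hcpos).mp le_rfl
        have hq1 : 1 ≤ PySem.Int.floordiv (k-1) ((countNZ ft : Nat) : Int) :=
          (PySem.Int.le_floordiv_iff_mul_le hcpos).mpr (by linarith)
        have hblstep : bLoop ft k ft.length (fb+1) =
            bLoop (subNZ (min m (PySem.Int.floordiv (k-1) ((countNZ ft : Nat) : Int))) ft)
              (k - (min m (PySem.Int.floordiv (k-1) ((countNZ ft : Nat) : Int))) * ((countNZ ft : Nat) : Int))
              ft.length fb := by
          simp only [bLoop]
          rw [if_pos hbr, hmin]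
        obtain ⟨p, hpdef⟩ : ∃ p, min m (PySem.Int.floordiv (k-1) ((countNZ ft : Nat) : Int)) = p := ⟨_, rfl⟩
        rw [hpdef] at hblstep
        have hp1 : 1 ≤ p := by rw [← hpdef]; exact le_min (by omega) hq1
        have hpm : p ≤ m := by rw [← hpdef]; exact min_le_left _ _
        have hpq : p ≤ PySem.Int.floordiv (k-1) ((countNZ ft : Nat) : Int) := by
          rw [← hpdef]; exact min_le_right _ _
        have hpcnt : p * ((countNZ ft : Nat) : Int) ≤ k - 1 :=
          le_trans (mul_le_mul_of_nonneg_right hpq (le_of_lt hcpos)) hq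
        have hple : p ≤ k - 1 := by nlinarith
        have hPp : ((p.toNat : Nat) : Int) = p := Int.toNat_of_nonneg (by omega)
        have hxb : ∀ x ∈ ft, 0 < x → ((p.toNat : Nat) : Int) ≤ x := by
          intro x hx hxp
          rw [hPp]
          exact le_trans hpm (hmle x hx hxp)
        have hkb : ((p.toNat : Nat) : Int) * ((countNZ ft : Nat) : Int) < k := by
          rw [hPp]; linarith
        have hPK : p.toNat ≤ K := by omega
        have hPn : p.toNat * ft.length ≤ fA := by
          calc p.toNat * ft.length ≤ K * ft.length := Nat.mul_le_mul_right _ hPK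
            _ ≤ (K+1) * (ft.length+1) := Nat.mul_le_mul (by omega) (by omega)
            _ ≤ fA := by omega
        obtain ⟨g, hg⟩ : ∃ g, fA = g + p.toNat * ft.length :=
          ⟨fA - p.toNat * ft.length, (Nat.sub_add_cancel hPn).symm⟩
        have hpasses := passes_lemma p.toNat ft k g hnpos hxb hkb
        obtain ⟨C, hCdef⟩ : ∃ C, ((p.toNat : Nat) : Int) * ((countNZ ft : Nat) : Int) = C := ⟨_, rfl⟩
        have hC1 : C ≤ k - 1 := by rw [← hCdef, hPp]; exact hpcnt
        have hCP : ((p.toNat : Nat) : Int) ≤ C := by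
          rw [← hCdef]
          nlinarith [hPp, hcpos]
        have hk'1 : 1 ≤ k - C := by omega
        have hsum1 : k - C < (subNZ ((p.toNat : Nat) : Int) ft).sum := by
          rw [sum_subNZ, hCdef]; linarith
        have hlen1 : (subNZ ((p.toNat : Nat) : Int) ft).length = ft.length := by simp [subNZ]
        have hK' : (k - C).toNat + p.toNat ≤ K := by omega
        have hP1 : 1 ≤ p.toNat := by omega
        have hchain : ((k-C).toNat + 1) * (ft.length+1) + p.toNat * ft.length ≤ (K+1) * (ft.length+1) := by
          calc ((k-C).toNat + 1) * (ft.length+1) + p.toNat * ft.length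
              ≤ ((k-C).toNat + 1) * (ft.length+1) + p.toNat * (ft.length+1) :=
                Nat.add_le_add_left (Nat.mul_le_mul_left _ (by omega)) _
            _ = ((k-C).toNat + 1 + p.toNat) * (ft.length+1) := by ring
            _ ≤ (K+1) * (ft.length+1) := Nat.mul_le_mul_right _ (by omega)
        have hfA' : ((k - C).toNat + 1) * (ft.length + 1) + 1 ≤ g := by
          linarith [hchain, hfA, hg.symm.le, hg.le]
        obtain ⟨r, hA, hB⟩ := ih (k - C).toNat (by omega)
          (subNZ ((p.toNat : Nat) : Int) ft) (k - C) g fb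
          (by omega) hsum1 le_rfl (by rw [hlen1]; exact hfA') (by omega)
        rw [hlen1] at hA hB
        refine ⟨r, ?_, ?_⟩
        · rw [hg, hpasses, hCdef]
          exact hA
        · rw [hblstep, ← hPp, hCdef]
          exact hB
      · -- final partial pass
        have hnfA : ft.length + 1 ≤ fA := by
          have h1 : ft.length + 1 ≤ (K+1) * (ft.length+1) := Nat.le_mul_of_pos_left _ (by omega)
          linarith
        have hnz0 : nzFrom ft 0 = countNZ ft := by simp [nzFrom]
        obtain ⟨r, h1, h2⟩ := find_lemma fA ft k 0 (by omega) hk1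
          (by rw [hnz0]; omega) (by omega)
        refine ⟨r, h1, ?_⟩
        simp only [bLoop]
        rw [if_neg hbr]
        rw [List.drop_zero] at h2
        exact h2

-- ===== VERDICT (by name: the statement is the Claim_ definition above) =====
theorem solution_spec : Claim_equal_solution := by
  intro ft k _ hpre
  unfold Spec_solution solution solution_alt
  by_cases hs : ft.sum ≤ k
  · simp [hs]
  · have hk0 : 0 ≤ k := hpre.resolve_left hs
    simp only [if_neg hs]
    have hfa : (k.toNat + 1) * (ft.length + 1) + 1 ≤ (k.toNat + 1) * (ft.length + 1) + ft.length + 1 := by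
      linarith
    obtain ⟨r, hA, hB⟩ := main_lemma k.toNat ft k
      ((k.toNat + 1) * (ft.length + 1) + ft.length + 1) (k.toNat + 2)
      hk0 (by omega) le_rfl hfa (by omega)
    rw [hA, hB]
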